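-- pv_equiv track=rewrite | github.com/TECHIES-V1/futher-mcp | src/further_mcp/fastapi_server.py | _pick_download_url
-- ===== SOURCE A (Python) =====
-- def _pick_download_url(download_links: list[dict] | list) -> str | None:
--     if not download_links:
--         return None
--     priorities = ("pdf", "application/pdf", "epub", "application/epub+zip", "text/plain")
--     for pref in priorities:
--         for item in download_links:
--             fmt = str(item.get("format", "")).lower()
--             url = item.get("url")
--             if url and pref in fmt:
--                 return str(url)
--     first = download_links[0]
--     return str(first.get("url")) if first.get("url") else None
-- ===== SOURCE B (Python) =====
-- def _pick_download_url(download_links: list[dict] | list) -> str | None: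
--     if not download_links:
--         return None
--     priorities = ("pdf", "application/pdf", "epub", "application/epub+zip", "text/plain")
--     best = (len(priorities), None)  # (rank, url): keep the strictly best rank, earliest wins ties
--     for item in download_links:
--         url = item.get("url")
--         if url:
--             fmt = str(item.get("format", "")).lower()
--             rank = next((i for i, p in enumerate(priorities) if p in fmt), len(priorities))
--             if rank < best[0]:
--                 best = (rank, str(url))
--     if best[1] is not None:
--         return best[1]
--     url0 = download_links[0].get("url")
--     return str(url0) if url0 else None
-- ===== Notes on version B (the rewrite author's own statement) =====
-- stated objective: alternative
-- what changed: Replaced A's five passes over the list (one per priority) by a single scan that computes each item's priority rank and keeps the url with the strictly smallest rank seen.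
import Mathlib
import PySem

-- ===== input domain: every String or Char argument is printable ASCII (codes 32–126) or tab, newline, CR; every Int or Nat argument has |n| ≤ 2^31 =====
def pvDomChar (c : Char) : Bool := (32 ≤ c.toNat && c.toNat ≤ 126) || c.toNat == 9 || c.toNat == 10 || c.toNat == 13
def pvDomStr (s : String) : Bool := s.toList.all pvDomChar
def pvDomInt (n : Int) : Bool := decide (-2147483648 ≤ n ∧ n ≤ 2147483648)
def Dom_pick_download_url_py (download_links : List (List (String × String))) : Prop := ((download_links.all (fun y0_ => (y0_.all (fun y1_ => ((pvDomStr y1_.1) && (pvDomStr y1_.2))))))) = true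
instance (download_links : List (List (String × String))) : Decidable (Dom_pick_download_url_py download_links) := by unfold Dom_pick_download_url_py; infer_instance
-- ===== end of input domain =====

-- B replaces A's outer pass per priority (five scans of the list) by a single scan keeping
-- the url of strictly smallest priority rank; same result, alternative one-pass structure.

-- dict.get(k): first-match lookup in the association list (shared trivial helper of both ports)
def pvAget (item : List (String × String)) (k : String) : Option String :=
  (item.find? (fun p => p.1 == k)).map (·.2)

-- ===== PORT A =====
-- inner loop: 'for item in download_links: … if url and pref in fmt: return str(url)'
def pickInnerA (pref : String) : List (List (String × String)) → Option String
  | [] => none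
  | item :: rest =>
    let fmt := PySem.Str.lower ((pvAget item "format").getD "")
    match pvAget item "url" with
    | some u => if u ≠ "" ∧ PySem.Str.isIn pref fmt then some u else pickInnerA pref rest
    | none => pickInnerA pref rest

-- outer loop: 'for pref in priorities: …'
def pickLoopA : List String → List (List (String × String)) → Option String
  | [], _ => none
  | p :: ps, links =>
    match pickInnerA p links with
    | some u => some u
    | none => pickLoopA ps links

def pick_download_url_py (download_links : List (List (String × String))) : Option String :=
  match download_links with
  | [] => none
  | first :: _ =>
    match pickLoopA ["pdf", "application/pdf", "epub", "application/epub+zip", "text/plain"] download_links with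
    | some u => some u
    | none =>
      match pvAget first "url" with
      | some u => if u ≠ "" then some u else none
      | none => none

-- ===== PORT B =====
-- rank = next((i for i, p in enumerate(priorities) if p in fmt), len(priorities))
def rankB : List String → String → Nat
  | [], _ => 0
  | p :: ps, fmt => if PySem.Str.isIn p fmt then 0 else rankB ps fmt + 1

-- one fold step: skip falsy urls, keep the strictly smaller rank
def stepB (prefs : List String) (best : Nat × Option String) (item : List (String × String)) : Nat × Option String :=
  match pvAget item "url" with
  | none => best
  | some u =>
    if u = "" then best
    else
      let fmt := PySem.Str.lower ((pvAget item "format").getD "")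
      let r := rankB prefs fmt
      if r < best.1 then (r, some u) else best

def pick_download_url_py_alt (download_links : List (List (String × String))) : Option String :=
  match download_links with
  | [] => none
  | first :: _ =>
    let prefs := ["pdf", "application/pdf", "epub", "application/epub+zip", "text/plain"]
    let best := download_links.foldl (stepB prefs) (prefs.length, none)
    match best.2 with
    | some u => some u
    | none =>
      match pvAget first "url" with
      | some u => if u ≠ "" then some u else none
      | none => none

-- ===== PRECONDITION & SPEC =====
def Spec_pick_download_url_py (download_links : List (List (String × String))) (out : Option String) : Prop := out = pick_download_url_py_alt download_links
instance (download_links : List (List (String × String))) (out : Option String) : Decidable (Spec_pick_download_url_py download_links out) := by unfold Spec_pick_download_url_py; infer_instance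

-- ===== CLAIM (what is proved, stated in full; the proofs are below) =====
def Claim_equal_pick_download_url_py : Prop := ∀ (download_links : List (List (String × String))), Dom_pick_download_url_py download_links → Spec_pick_download_url_py download_links (pick_download_url_py download_links)

-- ===== LEMMAS AND PROOFS =====

-- rank of an item w.r.t. a priority list: items without a truthy url never win
def rankI (prefs : List String) (item : List (String × String)) : Nat :=
  match pvAget item "url" with
  | some u => if u = "" then prefs.length else rankB prefs (PySem.Str.lower ((pvAget item "format").getD ""))
  | none => prefs.length

def urlStr (item : List (String × String)) : String := (pvAget item "url").getD ""

-- first item achieving the minimal rank, provided that rank is < the bound b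
def specGo (prefs : List String) (b : Nat) : List (List (String × String)) → Option (Nat × String)
  | [] => none
  | x :: xs =>
    let r := rankI prefs x
    if r < b then some ((specGo prefs r xs).getD (r, urlStr x)) else specGo prefs b xs

theorem rankB_le (prefs : List String) (fmt : String) : rankB prefs fmt ≤ prefs.length := by
  induction prefs with
  | nil => simp [rankB]
  | cons p ps ih => simp only [rankB, List.length_cons]; split <;> omega

theorem rankI_le (prefs : List String) (x : List (String × String)) : rankI prefs x ≤ prefs.length := by
  unfold rankI
  rcases h : pvAget x "url" with _ | u
  · simp
  · simp only []
    split
    · exact le_refl _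
    · exact rankB_le _ _

theorem specGo_zero (prefs : List String) (xs : List (List (String × String))) :
    specGo prefs 0 xs = none := by
  induction xs with
  | nil => rfl
  | cons x xs ih => simp [specGo, ih]

theorem specGo_cons_lt (prefs : List String) (b : Nat) (x : List (String × String))
    (xs : List (List (String × String))) (h : rankI prefs x < b) :
    specGo prefs b (x :: xs) =
      some ((specGo prefs (rankI prefs x) xs).getD (rankI prefs x, urlStr x)) := by
  simp [specGo, h]

theorem specGo_cons_ge (prefs : List String) (b : Nat) (x : List (String × String))
    (xs : List (List (String × String))) (h : ¬ rankI prefs x < b) :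
    specGo prefs b (x :: xs) = specGo prefs b xs := by
  simp [specGo, h]

-- the fold of B computes specGo
theorem foldB_eq_specGo (prefs : List String) (xs : List (List (String × String)))
    (b : Nat) (bu : Option String) (hb : b ≤ prefs.length) :
    xs.foldl (stepB prefs) (b, bu) =
      match specGo prefs b xs with
      | some (m, u) => (m, some u)
      | none => (b, bu) := by
  induction xs generalizing b bu with
  | nil => rfl
  | cons x xs ih =>
    simp only [List.foldl_cons, specGo]
    have hr := rankI_le prefs x
    rcases hu : pvAget x "url" with _ | u
    · have hrx : rankI prefs x = prefs.length := by simp [rankI, hu]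
      have : ¬ rankI prefs x < b := by omega
      rw [if_neg this]
      have : stepB prefs (b, bu) x = (b, bu) := by simp [stepB, hu]
      rw [this, ih b bu hb]
    · by_cases he : u = ""
      · have hrx : rankI prefs x = prefs.length := by simp [rankI, hu, he]
        have : ¬ rankI prefs x < b := by omega
        rw [if_neg this]
        have : stepB prefs (b, bu) x = (b, bu) := by simp [stepB, hu, he]
        rw [this, ih b bu hb]
      · have hrx : rankI prefs x =
            rankB prefs (PySem.Str.lower ((pvAget x "format").getD "")) := by
          simp [rankI, hu, he]
        have hus : urlStr x = u := by simp [urlStr, hu]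
        by_cases hlt : rankI prefs x < b
        · have : stepB prefs (b, bu) x = (rankI prefs x, some u) := by
            simp only [stepB, hu, if_neg he, ← hrx]
            rw [if_pos hlt]
          rw [if_pos hlt, this, ih _ _ (by omega)]
          rcases hs : specGo prefs (rankI prefs x) xs with _ | ⟨m, v⟩ <;> simp [hus]
        · have : stepB prefs (b, bu) x = (b, bu) := by
            simp only [stepB, hu, if_neg he, ← hrx]
            rw [if_neg hlt]
          rw [if_neg hlt, this, ih b bu hb]

-- shifting the head priority off: specGo at p::ps vs the inner scan for p plus specGo at ps
theorem specGo_shift (p : String) (ps : List String) (xs : List (List (String × String))) (b : Nat) :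
    specGo (p :: ps) (b + 1) xs =
      match pickInnerA p xs with
      | some u => some (0, u)
      | none => (specGo ps b xs).map (fun q => (q.1 + 1, q.2)) := by
  induction xs generalizing b with
  | nil => rfl
  | cons x xs ih =>
    rcases hu : pvAget x "url" with _ | u
    · have h1 : rankI (p :: ps) x = rankI ps x + 1 := by simp [rankI, hu]
      have hpick : pickInnerA p (x :: xs) = pickInnerA p xs := by simp [pickInnerA, hu]
      by_cases hlt : rankI ps x < b
      · rw [specGo_cons_lt _ _ _ _ (by omega), specGo_cons_lt _ _ _ _ hlt, hpick, h1, ih]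
        rcases hpi : pickInnerA p xs with _ | v
        · rcases hs : specGo ps (rankI ps x) xs with _ | ⟨m, w⟩ <;> simp
        · simp
      · rw [specGo_cons_ge _ _ _ _ (by omega), specGo_cons_ge _ _ _ _ hlt, hpick, ih]
    · by_cases he : u = ""
      · have h1 : rankI (p :: ps) x = rankI ps x + 1 := by simp [rankI, hu, he]
        have hpick : pickInnerA p (x :: xs) = pickInnerA p xs := by simp [pickInnerA, hu, he]
        by_cases hlt : rankI ps x < b
        · rw [specGo_cons_lt _ _ _ _ (by omega), specGo_cons_lt _ _ _ _ hlt, hpick, h1, ih]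
          rcases hpi : pickInnerA p xs with _ | v
          · rcases hs : specGo ps (rankI ps x) xs with _ | ⟨m, w⟩ <;> simp
          · simp
        · rw [specGo_cons_ge _ _ _ _ (by omega), specGo_cons_ge _ _ _ _ hlt, hpick, ih]
      · by_cases hm : PySem.Chars.isIn p.toList (PySem.Chars.lower ((pvAget x "format").getD "").toList) = true
        · have h0 : rankI (p :: ps) x = 0 := by simp [rankI, rankB, hu, he, hm]
          have hpick : pickInnerA p (x :: xs) = some u := by simp [pickInnerA, hu, he, hm]
          rw [specGo_cons_lt _ _ _ _ (by omega), h0, specGo_zero, hpick]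
          simp [urlStr, hu]
        · have h1 : rankI (p :: ps) x = rankI ps x + 1 := by simp [rankI, rankB, hu, he, hm]
          have hpick : pickInnerA p (x :: xs) = pickInnerA p xs := by simp [pickInnerA, hu, he, hm]
          by_cases hlt : rankI ps x < b
          · rw [specGo_cons_lt _ _ _ _ (by omega), specGo_cons_lt _ _ _ _ hlt, hpick, h1, ih]
            rcases hpi : pickInnerA p xs with _ | v
            · rcases hs : specGo ps (rankI ps x) xs with _ | ⟨m, w⟩ <;> simp
            · simp
          · rw [specGo_cons_ge _ _ _ _ (by omega), specGo_cons_ge _ _ _ _ hlt, hpick, ih]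

-- A's priority loop computes the url of specGo at the full bound
theorem pickLoopA_eq_specGo (prefs : List String) (xs : List (List (String × String))) :
    pickLoopA prefs xs = (specGo prefs prefs.length xs).map (·.2) := by
  induction prefs with
  | nil => simp [pickLoopA, specGo_zero]
  | cons p ps ih =>
    have : (p :: ps).length = ps.length + 1 := rfl
    rw [this, specGo_shift]
    simp only [pickLoopA]
    rcases hpi : pickInnerA p xs with _ | u
    · rw [ih]
      rcases hs : specGo ps ps.length xs with _ | ⟨m, v⟩ <;> simp
    · simp

-- ===== VERDICT (by name: the statement is the Claim_ definition above) =====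
theorem pick_download_url_py_spec : Claim_equal_pick_download_url_py := by
  intro dl _
  unfold Spec_pick_download_url_py pick_download_url_py pick_download_url_py_alt
  cases dl with
  | nil => rfl
  | cons first rest =>
    simp only []
    rw [foldB_eq_specGo _ _ _ _ (le_refl _), pickLoopA_eq_specGo]
    rcases hs : specGo ["pdf", "application/pdf", "epub", "application/epub+zip", "text/plain"]
        (["pdf", "application/pdf", "epub", "application/epub+zip", "text/plain"].length)
        (first :: rest) with _ | ⟨m, v⟩ <;> simp
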